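-- pv_equiv track=rewrite | github.com/AureumChaos/LEAP | leap_ec/statistical_helpers.py | _normalize_dicts
-- ===== SOURCE A (Python) =====
-- def _normalize_dicts(dict1, dict2):
--     """Helper function that converts two dicts to lists that are aligned to each other."""
--
--     def add_keys_from(dist1, dist2):
--         """If dist1 contains a key that dist2 doesn't, add it to dict2."""
--         for k in dist1.keys():
--             if k not in dist2:
--                 dist2[k] = 0
--
--     def values_sorted_by_key(dist):
--         """Get the values of dist, sorted by the keys."""
--         return [dist[k] for k in sorted(dist.keys())]
--
--     add_keys_from(dict1, dict2)
--     add_keys_from(dict2, dict1)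
--
--     n_dict1 = values_sorted_by_key(dict1)
--     n_dict2 = values_sorted_by_key(dict2)
--
--     return n_dict1, n_dict2
-- ===== SOURCE B (Python) =====
-- def _normalize_dicts(dict1, dict2):
--     """Helper function that converts two dicts to lists that are aligned to each other.
--
--     Merge-join reimplementation: sorts each dict's items once and emits both
--     aligned value lists in a single two-pointer merge, padding missing keys
--     with 0.  Unlike the original it does NOT mutate the argument dicts
--     (the return value is identical)."""
--     items1 = sorted(dict1.items())
--     items2 = sorted(dict2.items())
--     out1, out2 = [], []
--     i = j = 0
--     while i < len(items1) and j < len(items2):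
--         k1, v1 = items1[i]
--         k2, v2 = items2[j]
--         if k1 < k2:
--             out1.append(v1); out2.append(0); i += 1
--         elif k2 < k1:
--             out1.append(0); out2.append(v2); j += 1
--         else:
--             out1.append(v1); out2.append(v2); i += 1; j += 1
--     while i < len(items1):
--         out1.append(items1[i][1]); out2.append(0); i += 1
--     while j < len(items2):
--         out1.append(0); out2.append(items2[j][1]); j += 1
--     return out1, out2
-- ===== Notes on version B (the rewrite author's own statement) =====
-- stated objective: alternative
-- what changed: B is a merge-join: it sorts each dict's items once and builds both aligned value lists in a single two-pointer merge over the two sorted item lists (padding missing keys with 0), instead of A's two membership-add mutation passes over the dicts followed by two independent key sorts and lookups; unlike A, B does not mutate the argument dicts (the return value is identical).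
import Mathlib
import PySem

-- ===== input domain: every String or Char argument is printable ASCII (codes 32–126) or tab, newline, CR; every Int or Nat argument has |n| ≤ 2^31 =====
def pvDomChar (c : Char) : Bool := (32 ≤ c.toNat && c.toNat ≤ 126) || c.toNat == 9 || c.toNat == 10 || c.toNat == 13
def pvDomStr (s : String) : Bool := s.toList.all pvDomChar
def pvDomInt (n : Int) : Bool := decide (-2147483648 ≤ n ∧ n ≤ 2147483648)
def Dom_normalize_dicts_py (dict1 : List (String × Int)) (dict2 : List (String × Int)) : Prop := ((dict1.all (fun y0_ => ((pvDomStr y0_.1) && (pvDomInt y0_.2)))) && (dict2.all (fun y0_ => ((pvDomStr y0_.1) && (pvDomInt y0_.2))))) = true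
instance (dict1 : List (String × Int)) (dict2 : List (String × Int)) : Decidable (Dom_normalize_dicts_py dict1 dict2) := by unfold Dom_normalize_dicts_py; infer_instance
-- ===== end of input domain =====

-- B is a merge-join: each dict's items are sorted once and both aligned value lists are emitted in
-- one two-pointer merge (padding missing keys with 0), instead of A's two membership-add passes plus
-- two independent key sorts; return values proved equal. A mutates both argument dicts (adds missing
-- keys with value 0) while B mutates nothing — the equivalence proved here is about the RETURN value.


-- ===== PORT A =====
-- add_keys_from(dist1, dist2): for k in dist1.keys(): if k not in dist2: dist2[k] = 0
def pvAddKeysFrom (dist1 dist2 : PySem.Dict String Int) : PySem.Dict String Int :=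
  dist1.keys.foldl (fun d k => if d.contains k then d else d.insert k 0) dist2

-- values_sorted_by_key(dist): [dist[k] for k in sorted(dist.keys())]
-- dist[k] is ported as getD k 0: exact here since k is drawn from dist's own keys (no KeyError).
def pvValuesSortedByKey (dist : PySem.Dict String Int) : List Int :=
  (PySem.List.sorted dist.keys (fun k => k) false).map (fun k => dist.getD k 0)

def normalize_dicts_py (dict1 : List (String × Int)) (dict2 : List (String × Int)) : List Int × List Int :=
  let d1 := PySem.Dict.ofList dict1
  let d2 := PySem.Dict.ofList dict2
  let d2 := pvAddKeysFrom d1 d2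
  let d1 := pvAddKeysFrom d2 d1
  (pvValuesSortedByKey d1, pvValuesSortedByKey d2)

-- ===== PORT B =====
-- The three while loops of Source B as the obvious structural recursion on (items1 suffix, items2 suffix);
-- the appends to out1/out2 become the conses of the result pair.
def pvMergeLoop : List (String × Int) → List (String × Int) → List Int × List Int
  | [], [] => ([], [])
  | [], (_, v2) :: t2 =>
      let r := pvMergeLoop [] t2
      (0 :: r.1, v2 :: r.2)
  | (_, v1) :: t1, [] =>
      let r := pvMergeLoop t1 []
      (v1 :: r.1, 0 :: r.2)
  | (k1, v1) :: t1, (k2, v2) :: t2 =>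
      if k1 < k2 then
        let r := pvMergeLoop t1 ((k2, v2) :: t2)
        (v1 :: r.1, 0 :: r.2)
      else if k2 < k1 then
        let r := pvMergeLoop ((k1, v1) :: t1) t2
        (0 :: r.1, v2 :: r.2)
      else
        let r := pvMergeLoop t1 t2
        (v1 :: r.1, v2 :: r.2)

-- sorted(dict.items()) compares (key, value) tuples; since a dict's keys are distinct the order is
-- decided by the key alone, so sorting by the first component is exact here.
def normalize_dicts_py_alt (dict1 : List (String × Int)) (dict2 : List (String × Int)) : List Int × List Int :=
  let items1 := PySem.List.sorted (PySem.Dict.ofList dict1).items (fun p => p.1) false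
  let items2 := PySem.List.sorted (PySem.Dict.ofList dict2).items (fun p => p.1) false
  pvMergeLoop items1 items2

-- ===== PRECONDITION & SPEC =====
def Spec_normalize_dicts_py (dict1 : List (String × Int)) (dict2 : List (String × Int)) (out : List Int × List Int) : Prop := out = normalize_dicts_py_alt dict1 dict2
instance (dict1 : List (String × Int)) (dict2 : List (String × Int)) (out : List Int × List Int) : Decidable (Spec_normalize_dicts_py dict1 dict2 out) := by unfold Spec_normalize_dicts_py; infer_instance

-- ===== CLAIM (what is proved, stated in full; the proofs are below) =====
def Claim_equal_normalize_dicts_py : Prop := ∀ (dict1 : List (String × Int)) (dict2 : List (String × Int)), Dom_normalize_dicts_py dict1 dict2 → Spec_normalize_dicts_py dict1 dict2 (normalize_dicts_py dict1 dict2)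

-- ===== LEMMAS AND PROOFS =====

-- association-list lookup with default 0 (used only to STATE the merge invariant)
def pvALook (l : List (String × Int)) (k : String) : Int := (List.lookup k l).getD 0

-- the sequence of keys the merge walks, for the invariant
def pvMergeKeys : List String → List String → List String
  | [], v => v
  | u, [] => u
  | k1 :: u, k2 :: v =>
      if k1 < k2 then k1 :: pvMergeKeys u (k2 :: v)
      else if k2 < k1 then k2 :: pvMergeKeys (k1 :: u) v
      else k1 :: pvMergeKeys u v

lemma mem_pvMergeKeys (u v : List String) (x : String) :
    x ∈ pvMergeKeys u v ↔ x ∈ u ∨ x ∈ v := by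
  fun_induction pvMergeKeys u v with
  | case1 => simp
  | case2 => simp
  | case3 k1 u k2 v h ih => simp [ih]; tauto
  | case4 k1 u k2 v h h' ih => simp [ih]; tauto
  | case5 k1 u k2 v h h' ih =>
      have he : k1 = k2 := le_antisymm (not_lt.mp h') (not_lt.mp h)
      simp [ih, he]; tauto

lemma pvMergeKeys_pairwise (u v : List String)
    (hu : u.Pairwise (· < ·)) (hv : v.Pairwise (· < ·)) :
    (pvMergeKeys u v).Pairwise (· < ·) := by
  fun_induction pvMergeKeys u v with
  | case1 => exact hv
  | case2 => exact hu
  | case3 k1 u k2 v h ih =>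
      refine List.Pairwise.cons ?_ (ih hu.tail hv)
      intro x hx
      rcases (mem_pvMergeKeys _ _ _).mp hx with hxu | hxv
      · exact List.rel_of_pairwise_cons hu hxu
      · rcases List.mem_cons.mp hxv with rfl | hxv
        · exact h
        · exact h.trans (List.rel_of_pairwise_cons hv hxv)
  | case4 k1 u k2 v h h' ih =>
      refine List.Pairwise.cons ?_ (ih hu hv.tail)
      intro x hx
      rcases (mem_pvMergeKeys _ _ _).mp hx with hxu | hxv
      · rcases List.mem_cons.mp hxu with rfl | hxu
        · exact h'
        · exact h'.trans (List.rel_of_pairwise_cons hu hxu)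
      · exact List.rel_of_pairwise_cons hv hxv
  | case5 k1 u k2 v h h' ih =>
      have he : k1 = k2 := le_antisymm (not_lt.mp h') (not_lt.mp h)
      refine List.Pairwise.cons ?_ (ih hu.tail hv.tail)
      intro x hx
      rcases (mem_pvMergeKeys _ _ _).mp hx with hxu | hxv
      · exact List.rel_of_pairwise_cons hu hxu
      · exact he ▸ List.rel_of_pairwise_cons hv hxv


lemma pvALook_cons_ne (a : String) (b : Int) (l : List (String × Int)) (x : String) (h : a ≠ x) :
    pvALook ((a, b) :: l) x = pvALook l x := by
  have : (x == a) = false := beq_eq_false_iff_ne.mpr (Ne.symm h)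
  simp [pvALook, List.lookup, this]

lemma pvALook_not_mem (l : List (String × Int)) (x : String) (h : x ∉ l.map Prod.fst) :
    pvALook l x = 0 := by
  induction l with
  | nil => rfl
  | cons p t ih =>
      obtain ⟨a, b⟩ := p
      simp only [List.map_cons, List.mem_cons] at h
      push Not at h
      rw [pvALook_cons_ne _ _ _ _ (Ne.symm h.1)]
      exact ih h.2

lemma pvALook_map (u : List String) (f : String → Int) (x : String) (hx : x ∈ u) :
    pvALook (u.map (fun k => (k, f k))) x = f x := by
  induction u with
  | nil => simp at hx
  | cons a t ih =>
      by_cases hax : a = x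
      · subst hax; simp [pvALook]
      · rw [List.map_cons, pvALook_cons_ne _ _ _ _ hax]
        rcases List.mem_cons.mp hx with rfl | hxt
        · exact absurd rfl hax
        · exact ih hxt
lemma pvMergeKeys_nil_left (v : List String) : pvMergeKeys [] v = v := by
  cases v <;> simp [pvMergeKeys]

lemma pvMergeKeys_nil_right (u : List String) : pvMergeKeys u [] = u := by
  cases u <;> simp [pvMergeKeys]

lemma pvALook_head (k : String) (v : Int) (t : List (String × Int)) :
    pvALook ((k, v) :: t) k = v := by simp [pvALook, List.lookup]

lemma pvConsMap (k : String) (w : Int) (M : List String) (f g : String → Int)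
    (hw : g k = w) (hc : ∀ x ∈ M, f x = g x) :
    (w :: M.map f) = (k :: M).map g := by
  rw [List.map_cons, hw]
  exact congrArg _ (List.map_congr_left hc)

lemma pvMergeLoop_eq (l1 l2 : List (String × Int))
    (h1 : l1.Pairwise (fun a b => a.1 < b.1)) (h2 : l2.Pairwise (fun a b => a.1 < b.1)) :
    pvMergeLoop l1 l2 =
      ((pvMergeKeys (l1.map Prod.fst) (l2.map Prod.fst)).map (pvALook l1),
       (pvMergeKeys (l1.map Prod.fst) (l2.map Prod.fst)).map (pvALook l2)) := by
  revert h1 h2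
  fun_induction pvMergeLoop l1 l2 with
  | case1 => intro h1 h2; simp [pvMergeKeys]
  | case2 k2 v2 t2 r ih =>
      intro h1 h2
      rw [show r = pvMergeLoop [] t2 from rfl, ih List.Pairwise.nil h2.tail]
      dsimp only
      simp only [List.map_cons, List.map_nil]
      rw [pvMergeKeys_nil_left, pvMergeKeys_nil_left]
      refine Prod.ext ?_ ?_
      · exact pvConsMap k2 0 _ _ _ rfl (fun x _ => rfl)
      · refine pvConsMap k2 v2 _ _ _ (pvALook_head k2 v2 t2) (fun x hx => ?_)
        rcases List.mem_map.mp hx with ⟨p, hp, rfl⟩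
        exact (pvALook_cons_ne _ _ _ _ (ne_of_lt (List.rel_of_pairwise_cons h2 hp))).symm
  | case3 k1 v1 t1 r ih =>
      intro h1 h2
      rw [show r = pvMergeLoop t1 [] from rfl, ih h1.tail List.Pairwise.nil]
      dsimp only
      simp only [List.map_cons, List.map_nil]
      rw [pvMergeKeys_nil_right, pvMergeKeys_nil_right]
      refine Prod.ext ?_ ?_
      · refine pvConsMap k1 v1 _ _ _ (pvALook_head k1 v1 t1) (fun x hx => ?_)
        rcases List.mem_map.mp hx with ⟨p, hp, rfl⟩
        exact (pvALook_cons_ne _ _ _ _ (ne_of_lt (List.rel_of_pairwise_cons h1 hp))).symm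
      · exact pvConsMap k1 0 _ _ _ rfl (fun x _ => rfl)
  | case4 k1 v1 t1 k2 v2 t2 h r ih =>
      intro h1 h2
      rw [show r = pvMergeLoop t1 ((k2, v2) :: t2) from rfl, ih h1.tail h2]
      dsimp only
      simp only [List.map_cons]
      rw [show pvMergeKeys (k1 :: t1.map Prod.fst) (k2 :: t2.map Prod.fst)
            = k1 :: pvMergeKeys (t1.map Prod.fst) (k2 :: t2.map Prod.fst) by
          simp [pvMergeKeys, h]]
      have hkey : ∀ x ∈ pvMergeKeys (t1.map Prod.fst) (k2 :: t2.map Prod.fst), k1 < x := by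
        intro x hx
        rcases (mem_pvMergeKeys _ _ x).mp hx with hxu | hxv
        · rcases List.mem_map.mp hxu with ⟨p, hp, rfl⟩
          exact List.rel_of_pairwise_cons h1 hp
        · rcases List.mem_cons.mp hxv with rfl | hxv
          · exact h
          · rcases List.mem_map.mp hxv with ⟨p, hp, rfl⟩
            exact h.trans (List.rel_of_pairwise_cons h2 hp)
      refine Prod.ext ?_ ?_
      · refine pvConsMap k1 v1 _ _ _ (pvALook_head k1 v1 t1) (fun x hx => ?_)
        exact (pvALook_cons_ne _ _ _ _ (ne_of_lt (hkey x hx))).symm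
      · refine pvConsMap k1 0 _ _ _ ?_ (fun x _ => rfl)
        refine pvALook_not_mem _ _ ?_
        intro hm
        rw [List.map_cons] at hm
        rcases List.mem_cons.mp hm with he | hm
        · exact absurd he (ne_of_lt h)
        · rcases List.mem_map.mp hm with ⟨p, hp, hpe⟩
          exact absurd hpe (ne_of_gt (h.trans (List.rel_of_pairwise_cons h2 hp)))
  | case5 k1 v1 t1 k2 v2 t2 h h' r ih =>
      intro h1 h2
      rw [show r = pvMergeLoop ((k1, v1) :: t1) t2 from rfl, ih h1 h2.tail]
      dsimp only
      simp only [List.map_cons]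
      rw [show pvMergeKeys (k1 :: t1.map Prod.fst) (k2 :: t2.map Prod.fst)
            = k2 :: pvMergeKeys (k1 :: t1.map Prod.fst) (t2.map Prod.fst) by
          simp [pvMergeKeys, h, h']]
      have hkey : ∀ x ∈ pvMergeKeys (k1 :: t1.map Prod.fst) (t2.map Prod.fst), k2 < x := by
        intro x hx
        rcases (mem_pvMergeKeys _ _ x).mp hx with hxu | hxv
        · rcases List.mem_cons.mp hxu with rfl | hxu
          · exact h'
          · rcases List.mem_map.mp hxu with ⟨p, hp, rfl⟩
            exact h'.trans (List.rel_of_pairwise_cons h1 hp)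
        · rcases List.mem_map.mp hxv with ⟨p, hp, rfl⟩
          exact List.rel_of_pairwise_cons h2 hp
      refine Prod.ext ?_ ?_
      · refine pvConsMap k2 0 _ _ _ ?_ (fun x _ => rfl)
        refine pvALook_not_mem _ _ ?_
        intro hm
        rw [List.map_cons] at hm
        rcases List.mem_cons.mp hm with he | hm
        · exact absurd he (ne_of_lt h')
        · rcases List.mem_map.mp hm with ⟨p, hp, hpe⟩
          exact absurd hpe (ne_of_gt (h'.trans (List.rel_of_pairwise_cons h1 hp)))
      · refine pvConsMap k2 v2 _ _ _ (pvALook_head k2 v2 t2) (fun x hx => ?_)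
        exact (pvALook_cons_ne _ _ _ _ (ne_of_lt (hkey x hx))).symm
  | case6 k1 v1 t1 k2 v2 t2 h h' r ih =>
      intro h1 h2
      have he : k1 = k2 := le_antisymm (not_lt.mp h') (not_lt.mp h)
      subst he
      rw [show r = pvMergeLoop t1 t2 from rfl, ih h1.tail h2.tail]
      dsimp only
      simp only [List.map_cons]
      rw [show pvMergeKeys (k1 :: t1.map Prod.fst) (k1 :: t2.map Prod.fst)
            = k1 :: pvMergeKeys (t1.map Prod.fst) (t2.map Prod.fst) by
          simp [pvMergeKeys]]
      have hkey : ∀ x ∈ pvMergeKeys (t1.map Prod.fst) (t2.map Prod.fst), k1 < x := by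
        intro x hx
        rcases (mem_pvMergeKeys _ _ x).mp hx with hxu | hxv
        · rcases List.mem_map.mp hxu with ⟨p, hp, rfl⟩
          exact List.rel_of_pairwise_cons h1 hp
        · rcases List.mem_map.mp hxv with ⟨p, hp, rfl⟩
          exact List.rel_of_pairwise_cons h2 hp
      refine Prod.ext ?_ ?_
      · refine pvConsMap k1 v1 _ _ _ (pvALook_head k1 v1 t1) (fun x hx => ?_)
        exact (pvALook_cons_ne _ _ _ _ (ne_of_lt (hkey x hx))).symm
      · refine pvConsMap k1 v2 _ _ _ (pvALook_head k1 v2 t2) (fun x hx => ?_)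
        exact (pvALook_cons_ne _ _ _ _ (ne_of_lt (hkey x hx))).symm

-- A's conditional add IS setdefault k 0.
lemma condInsert_eq_setdefault (d : PySem.Dict String Int) (k : String) :
    (if d.contains k then d else d.insert k 0) = d.setdefault k 0 := by
  by_cases h : d.contains k = true
  · rw [if_pos h, PySem.Dict.setdefault_of_contains _ 0 h]
  · rw [if_neg h, PySem.Dict.setdefault_of_not_contains _ 0 (by simpa using h)]

lemma getD_setdefault_zero (d : PySem.Dict String Int) (k x : String) :
    (d.setdefault k 0).getD x 0 = d.getD x 0 := by
  by_cases h : d.contains k = true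
  · rw [PySem.Dict.setdefault_of_contains _ 0 h]
  · rw [PySem.Dict.setdefault_of_not_contains _ 0 (by simpa using h),
        PySem.Dict.getD_insert]
    split_ifs with hx
    · subst hx; exact (PySem.Dict.getD_of_not_contains _ 0 (by simpa using h)).symm
    · rfl

-- A setdefault-0 loop never changes any getD-with-default-0 lookup.
lemma getD_foldl_setdefault (l : List String) (d : PySem.Dict String Int) (x : String) :
    (l.foldl (fun d k => d.setdefault k 0) d).getD x 0 = d.getD x 0 := by
  induction l generalizing d with
  | nil => rfl
  | cons k t ih => simp [List.foldl, ih, getD_setdefault_zero]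

lemma keys_setdefault_zero (d : PySem.Dict String Int) (k : String) :
    (d.setdefault k 0).keys = PySem.Set.add d.keys k := by
  by_cases h : d.contains k = true
  · rw [PySem.Dict.setdefault_of_contains _ 0 h,
        PySem.Set.add_of_mem ((PySem.Dict.contains_iff_mem_keys d k).mp h)]
  · rw [PySem.Dict.setdefault_of_not_contains _ 0 (by simpa using h),
        PySem.Dict.keys_insert_of_not_contains _ 0 (by simpa using h),
        PySem.Set.add_of_not_mem]
    intro hm
    exact h ((PySem.Dict.contains_iff_mem_keys d k).mpr hm)

lemma keys_foldl_setdefault (l : List String) (d : PySem.Dict String Int) :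
    (l.foldl (fun d k => d.setdefault k 0) d).keys = PySem.Set.update d.keys l := by
  induction l generalizing d with
  | nil => rfl
  | cons k t ih => rw [List.foldl, ih, keys_setdefault_zero, PySem.Set.update_cons]

lemma addKeysFrom_eq_foldl_setdefault (dist1 dist2 : PySem.Dict String Int) :
    pvAddKeysFrom dist1 dist2 = dist1.keys.foldl (fun d k => d.setdefault k 0) dist2 := by
  unfold pvAddKeysFrom
  simp only [condInsert_eq_setdefault]

-- sorted of a Nodup list (identity key) is strictly increasing
lemma sorted_nodup_pairwise_lt (u : List String) (hu : u.Nodup) :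
    (PySem.List.sorted u (fun k => k) false).Pairwise (· < ·) := by
  have hle : (PySem.List.sorted u (fun k => k) false).Pairwise (fun a b => a ≤ b) :=
    PySem.List.sorted_pairwise u _
  have hne : (PySem.List.sorted u (fun k => k) false).Pairwise (fun a b => a ≠ b) :=
    (PySem.List.sorted_perm u _ false).symm.nodup hu
  exact (hle.and hne).imp fun hab => lt_of_le_of_ne hab.1 hab.2

-- the sorted items list of a dict is the sorted key list paired with the lookups
lemma sorted_items_eq (d : PySem.Dict String Int) (hnd : d.keys.Nodup) :
    PySem.List.sorted d.items (fun p => p.1) false =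
      (PySem.List.sorted d.keys (fun k => k) false).map (fun k => (k, d.getD k 0)) := by
  refine PySem.List.sorted_eq_of_perm_of_pairwise_lt d.items _ (fun p => p.1) ?_ ?_
  · rw [PySem.Dict.items_eq_map_keys d hnd 0]
    exact (PySem.List.sorted_perm d.keys _ false).map _
  · refine List.pairwise_map.mpr ?_
    simpa using sorted_nodup_pairwise_lt d.keys hnd
-- ===== VERDICT (by name: the statement is the Claim_ definition above) =====
theorem normalize_dicts_py_spec : Claim_equal_normalize_dicts_py := by
  intro dict1 dict2 _
  unfold Spec_normalize_dicts_py normalize_dicts_py normalize_dicts_py_alt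
  simp only [addKeysFrom_eq_foldl_setdefault]
  set d1 := PySem.Dict.ofList dict1 with hd1
  set d2 := PySem.Dict.ofList dict2 with hd2
  have hn1 : d1.keys.Nodup := PySem.Dict.nodup_keys_ofList dict1
  have hn2 : d2.keys.Nodup := PySem.Dict.nodup_keys_ofList dict2
  -- the common sorted key union both results are lookups along
  set S1 := PySem.List.sorted d1.keys (fun k => k) false with hS1
  set S2 := PySem.List.sorted d2.keys (fun k => k) false with hS2
  have hp1 : S1.Pairwise (· < ·) := sorted_nodup_pairwise_lt d1.keys hn1
  have hp2 : S2.Pairwise (· < ·) := sorted_nodup_pairwise_lt d2.keys hn2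
  set MK := pvMergeKeys S1 S2 with hMK
  have hmkp : MK.Pairwise (· < ·) := pvMergeKeys_pairwise S1 S2 hp1 hp2
  have hmknd : MK.Nodup := hmkp.imp fun h => ne_of_lt h
  have hmkmem : ∀ x, x ∈ MK ↔ x ∈ d1.keys ∨ x ∈ d2.keys := by
    intro x
    rw [hMK, mem_pvMergeKeys, hS1, hS2, PySem.List.mem_sorted, PySem.List.mem_sorted]
  -- ===== B's side: the merge is the lookups along MK =====
  have hitems1 : PySem.List.sorted d1.items (fun p => p.1) false
      = S1.map (fun k => (k, d1.getD k 0)) := sorted_items_eq d1 hn1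
  have hitems2 : PySem.List.sorted d2.items (fun p => p.1) false
      = S2.map (fun k => (k, d2.getD k 0)) := sorted_items_eq d2 hn2
  have hlook : ∀ (d : PySem.Dict String Int) (S : List String),
      S = PySem.List.sorted d.keys (fun k => k) false →
      ∀ x, pvALook (S.map (fun k => (k, d.getD k 0))) x = d.getD x 0 := by
    intro d S hS x
    by_cases hx : x ∈ S
    · exact pvALook_map S _ x hx
    · rw [pvALook_not_mem _ _ (by simpa using hx)]
      refine (PySem.Dict.getD_of_not_contains _ 0 ?_).symm
      rw [hS, PySem.List.mem_sorted] at hx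
      simpa [PySem.Dict.contains_eq_decide_mem_keys] using hx
  have hB : pvMergeLoop (PySem.List.sorted d1.items (fun p => p.1) false)
        (PySem.List.sorted d2.items (fun p => p.1) false)
      = (MK.map (fun k => d1.getD k 0), MK.map (fun k => d2.getD k 0)) := by
    rw [hitems1, hitems2,
        pvMergeLoop_eq _ _
          (List.pairwise_map.mpr (hp1.imp fun h => h))
          (List.pairwise_map.mpr (hp2.imp fun h => h))]
    have hm1 : (S1.map (fun k => (k, d1.getD k 0))).map Prod.fst = S1 := by
      rw [List.map_map]; exact List.map_id _
    have hm2 : (S2.map (fun k => (k, d2.getD k 0))).map Prod.fst = S2 := by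
      rw [List.map_map]; exact List.map_id _
    rw [hm1, hm2, ← hMK]
    exact Prod.ext
      (List.map_congr_left fun x _ => hlook d1 S1 hS1 x)
      (List.map_congr_left fun x _ => hlook d2 S2 hS2 x)
  -- ===== A's side: both value lists are the same lookups along MK =====
  have hK2 := keys_foldl_setdefault d1.keys d2
  have hK1 := keys_foldl_setdefault (d1.keys.foldl (fun d k => d.setdefault k 0) d2).keys d1
  have hmem1 : ∀ x, x ∈ (d1.keys.foldl (fun d k => d.setdefault k 0) d2).keys ↔
      x ∈ d1.keys ∨ x ∈ d2.keys := by
    intro x; rw [hK2, PySem.Set.mem_update]; tauto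
  have hmemA1 : ∀ x, x ∈ ((d1.keys.foldl (fun d k => d.setdefault k 0) d2).keys.foldl
      (fun d k => d.setdefault k 0) d1).keys ↔ x ∈ d1.keys ∨ x ∈ d2.keys := by
    intro x; rw [hK1, PySem.Set.mem_update, hmem1]; tauto
  have hndA1 : ((d1.keys.foldl (fun d k => d.setdefault k 0) d2).keys.foldl
      (fun d k => d.setdefault k 0) d1).keys.Nodup := by
    rw [hK1]; exact PySem.Set.nodup_update _ _ hn1
  have hndA2 : (d1.keys.foldl (fun d k => d.setdefault k 0) d2).keys.Nodup := by
    rw [hK2]; exact PySem.Set.nodup_update _ _ hn2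
  -- the sorted key list on each A side IS MK
  have hsortMK : ∀ (u : List String), u.Nodup → (∀ x, x ∈ u ↔ x ∈ d1.keys ∨ x ∈ d2.keys) →
      PySem.List.sorted u (fun k => k) false = MK := by
    intro u hu hmem
    refine PySem.List.sorted_eq_of_perm_of_pairwise_lt u _ (fun k => k) ?_ (hmkp.imp fun h => h)
    refine (List.perm_ext_iff_of_nodup hmknd hu).mpr fun x => ?_
    rw [hmkmem x, hmem x]
  unfold pvValuesSortedByKey
  rw [hsortMK _ hndA1 hmemA1, hsortMK _ hndA2 hmem1, hB]
  exact Prod.ext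
    (List.map_congr_left fun x _ => getD_foldl_setdefault _ _ _)
    (List.map_congr_left fun x _ => getD_foldl_setdefault _ _ _)
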